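-- pv_equiv track=rewrite | github.com/eyaamor4/meme-V2-rag | nvd.py | _pick_desc
-- ===== SOURCE A (Python) =====
-- from typing import Any, Dict, Optional
--
-- def _pick_desc(descs: Any) -> Optional[str]:
--     if not isinstance(descs, list):
--         return None
--     for d in descs:
--         if isinstance(d, dict) and d.get("lang") == "en" and d.get("value"):
--             return d["value"]
--     for d in descs:
--         if isinstance(d, dict) and d.get("value"):
--             return d["value"]
--     return None
-- ===== SOURCE B (Python) =====
-- from typing import Any, Optional
--
-- def _pick_desc(descs: Any) -> Optional[str]:
--     if not isinstance(descs, list):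
--         return None
--     fallback = None
--     for d in descs:
--         if isinstance(d, dict) and d.get("value"):
--             if d.get("lang") == "en":
--                 return d["value"]
--             if fallback is None:
--                 fallback = d["value"]
--     return fallback
-- ===== Notes on version B (the rewrite author's own statement) =====
-- stated objective: alternative
-- what changed: Replaced A's two sequential scans (English-first, then any) by a single pass that returns immediately on the first truthy English value and remembers the first truthy non-English value as a fallback.
import Mathlib
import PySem

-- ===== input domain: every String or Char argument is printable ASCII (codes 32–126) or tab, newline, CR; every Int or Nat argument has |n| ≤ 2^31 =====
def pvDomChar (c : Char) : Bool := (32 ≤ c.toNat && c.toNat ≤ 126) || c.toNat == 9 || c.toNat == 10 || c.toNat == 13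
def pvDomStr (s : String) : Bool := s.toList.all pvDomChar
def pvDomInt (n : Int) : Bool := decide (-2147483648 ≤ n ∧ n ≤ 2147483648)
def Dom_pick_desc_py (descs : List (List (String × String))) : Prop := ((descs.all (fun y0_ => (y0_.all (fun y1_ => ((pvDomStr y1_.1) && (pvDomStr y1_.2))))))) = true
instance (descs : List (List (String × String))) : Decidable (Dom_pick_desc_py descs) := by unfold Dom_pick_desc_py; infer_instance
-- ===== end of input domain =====

-- B: single pass with English-priority early return and a first-truthy-value fallback,
-- instead of A's two sequential scans; return value equivalence proved on Dom.

-- ===== PORT A =====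
-- d.get(k): first-match lookup in the association list (Python dict)
def pvGetA (d : List (String × String)) (k : String) : Option String :=
  (PySem.Dict.mk d).get? k

-- first loop of A: first dict with lang == "en" and truthy value
def pvLoopEn : List (List (String × String)) → Option String
  | [] => none
  | d :: rest =>
    if pvGetA d "lang" = some "en" ∧ (pvGetA d "value").getD "" ≠ "" then
      some ((pvGetA d "value").getD "")
    else pvLoopEn rest

-- second loop of A: first dict with truthy value
def pvLoopAny : List (List (String × String)) → Option String
  | [] => none
  | d :: rest =>
    if (pvGetA d "value").getD "" ≠ "" then
      some ((pvGetA d "value").getD "")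
    else pvLoopAny rest

def pick_desc_py (descs : List (List (String × String))) : Option String :=
  match pvLoopEn descs with
  | some v => some v
  | none => pvLoopAny descs

-- ===== PORT B =====
-- B's single loop carrying the fallback accumulator
def pvLoopB (fallback : Option String) : List (List (String × String)) → Option String
  | [] => fallback
  | d :: rest =>
    let v := (pvGetA d "value").getD ""
    if v ≠ "" then
      if pvGetA d "lang" = some "en" then some v
      else pvLoopB (if fallback = none then some v else fallback) rest
    else pvLoopB fallback rest

def pick_desc_py_alt (descs : List (List (String × String))) : Option String :=
  pvLoopB none descs

-- ===== PRECONDITION & SPEC =====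
def Spec_pick_desc_py (descs : List (List (String × String))) (out : Option String) : Prop := out = pick_desc_py_alt descs
instance (descs : List (List (String × String))) (out : Option String) : Decidable (Spec_pick_desc_py descs out) := by unfold Spec_pick_desc_py; infer_instance

-- ===== CLAIM (what is proved, stated in full; the proofs are below) =====
def Claim_equal_pick_desc_py : Prop := ∀ (descs : List (List (String × String))), Dom_pick_desc_py descs → Spec_pick_desc_py descs (pick_desc_py descs)

-- ===== LEMMAS AND PROOFS =====

-- ===== VERDICT (by name: the statement is the Claim_ definition above) =====
-- invariant of B's loop: it is A's English scan, else the saved fallback, else A's any scan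
theorem pvLoopB_inv (l : List (List (String × String))) (fb : Option String) :
    pvLoopB fb l =
      match pvLoopEn l with
      | some v => some v
      | none => match fb with
                | some f => some f
                | none => pvLoopAny l := by
  induction l generalizing fb with
  | nil => cases fb <;> simp [pvLoopB, pvLoopEn, pvLoopAny]
  | cons d rest ih =>
    by_cases hv : (pvGetA d "value").getD "" ≠ "" <;>
      by_cases hl : pvGetA d "lang" = some "en" <;>
        cases fb <;>
          simp [pvLoopB, pvLoopEn, pvLoopAny, hv, hl, ih]

theorem pick_desc_py_spec : Claim_equal_pick_desc_py := by
  intro descs _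
  unfold Spec_pick_desc_py pick_desc_py pick_desc_py_alt
  rw [pvLoopB_inv]
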